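-- pv_equiv track=rewrite | github.com/Python-Programming-2026/project1-caesar-cipher-wenchilao | cracker.py | word_match_score
-- ===== SOURCE A (Python) =====
-- COMMON_WORDS = {
--     "hello", "world", "the", "and", "is", "this", "that", "python",
--     "cipher", "caesar", "test", "text", "program", "example", "you",
--     "he", "she", "it", "we", "they", "of", "to", "in", "on", "for"
-- }
--
-- def word_match_score(text: str) -> int:
--     """
--     统计文本中匹配到的常见英文单词数量。
--     分数越高，越可能是正常英文。
--     """
--     words = text.lower().replace(",", " ").replace(".", " ").replace("!", " ") \
--         .replace("?", " ").replace(":", " ").replace(";", " ").split()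
--
--     score = 0
--     for word in words:
--         if word in COMMON_WORDS:
--             score += 1
--     return score
-- ===== SOURCE B (Python) =====
-- COMMON_WORDS = {
--     "hello", "world", "the", "and", "is", "this", "that", "python",
--     "cipher", "caesar", "test", "text", "program", "example", "you",
--     "he", "she", "it", "we", "they", "of", "to", "in", "on", "for"
-- }
--
-- def word_match_score(text: str) -> int:
--     # Single character-level pass: no intermediate replaced string, no token list.
--     score = 0
--     cur = ""
--     for ch in text:
--         c = ch.lower()
--         if c in ",.!?:;" or c.isspace():
--             if cur in COMMON_WORDS:
--                 score += 1
--             cur = ""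
--         else:
--             cur += c
--     if cur in COMMON_WORDS:
--         score += 1
--     return score
-- ===== Notes on version B (the rewrite author's own statement) =====
-- stated objective: alternative
-- what changed: B is a single character-level scan that lowercases, treats punctuation as whitespace and scores each word at its boundary on the fly, instead of A's staged pipeline of six string replacements, a split into a token list and a membership loop over the tokens.
import Mathlib
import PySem

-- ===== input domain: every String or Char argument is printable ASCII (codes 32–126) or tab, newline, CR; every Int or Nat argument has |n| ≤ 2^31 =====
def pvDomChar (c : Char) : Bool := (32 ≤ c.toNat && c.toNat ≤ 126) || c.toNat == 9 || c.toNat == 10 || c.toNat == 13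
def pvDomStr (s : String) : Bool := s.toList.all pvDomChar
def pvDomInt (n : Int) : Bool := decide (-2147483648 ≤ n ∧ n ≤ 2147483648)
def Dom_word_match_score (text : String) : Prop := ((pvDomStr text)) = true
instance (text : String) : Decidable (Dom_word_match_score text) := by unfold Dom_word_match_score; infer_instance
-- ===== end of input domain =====

-- B replaces A's staged pipeline (six replacements, split, membership loop over the tokens)
-- by a single character-level scan that scores each word at its boundary (alternative decomposition).

-- ===== PORT A =====
def COMMON_WORDS : List String := PySem.Set.ofList
  ["hello", "world", "the", "and", "is", "this", "that", "python",
   "cipher", "caesar", "test", "text", "program", "example", "you",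
   "he", "she", "it", "we", "they", "of", "to", "in", "on", "for"]

def word_match_score (text : String) : Int :=
  let words := PySem.Str.split₀
    (PySem.Str.replace (PySem.Str.replace (PySem.Str.replace (PySem.Str.replace
      (PySem.Str.replace (PySem.Str.replace (PySem.Str.lower text) "," " ") "." " ")
      "!" " ") "?" " ") ":" " ") ";" " ")
  words.foldl (fun score word => if COMMON_WORDS.contains word then score + 1 else score) 0

-- ===== PORT B =====
-- the for-loop of Source B: state = (remaining chars, current word `cur`, `score`);
-- `c in ",.!?:;"` is single-char membership, ported as list membership
def wmsAltGo : List Char → List Char → Int → Int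
  | [], cur, score =>
      if COMMON_WORDS.contains (String.ofList cur) then score + 1 else score
  | ch :: rest, cur, score =>
      let c := PySem.Chars.lowerChar ch
      if [',', '.', '!', '?', ':', ';'].contains c || PySem.Chars.isspace c then
        wmsAltGo rest [] (if COMMON_WORDS.contains (String.ofList cur) then score + 1 else score)
      else
        wmsAltGo rest (cur ++ [c]) score

def word_match_score_alt (text : String) : Int :=
  wmsAltGo text.toList [] 0

-- ===== PRECONDITION & SPEC =====
def Spec_word_match_score (text : String) (out : Int) : Prop := out = word_match_score_alt text
instance (text : String) (out : Int) : Decidable (Spec_word_match_score text out) := by unfold Spec_word_match_score; infer_instance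

-- ===== CLAIM (what is proved, stated in full; the proofs are below) =====
def Claim_equal_word_match_score : Prop := ∀ (text : String), Dom_word_match_score text → Spec_word_match_score text (word_match_score text)

-- ===== LEMMAS AND PROOFS =====

-- the per-character effect of A's lower + six punctuation replacements
def pvTrans (ch : Char) : Char :=
  let c := PySem.Chars.lowerChar ch
  if [',', '.', '!', '?', ':', ';'].contains c then ' ' else c

-- the token predicate both scores count
def pvHit (w : List Char) : Bool := COMMON_WORDS.contains (String.ofList w)

-- replacing a single char by a single char is a map
lemma replace_go_single (o n : Char) :
    ∀ (l : List Char) (fuel : Nat) (acc : List Char), l.length ≤ fuel →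
      PySem.Chars.replace.go [o] [n] fuel l acc
        = acc.reverse ++ l.map (fun c => if c = o then n else c) := by
  intro l
  induction l with
  | nil =>
    intro fuel acc _
    cases fuel <;> rw [PySem.Chars.replace.go] <;> simp
  | cons c t ih =>
    intro fuel acc hf
    cases fuel with
    | zero => simp at hf
    | succ fuel =>
      rw [PySem.Chars.replace.go]
      by_cases h : c = o
      · subst h
        have hp : [c].isPrefixOf (c :: t) = true := by simp [List.isPrefixOf]
        simp only [hp, if_pos]
        rw [show List.drop [c].length (c :: t) = t from rfl]
        rw [ih fuel ([n].reverse ++ acc) (by simpa using hf)]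
        simp
      · have hp : [o].isPrefixOf (c :: t) = false := by
          simp [List.isPrefixOf]; exact fun hh => h hh.symm
        simp only [hp]
        rw [ih fuel (c :: acc) (by simpa using hf)]
        simp [h]

lemma replace_single (o n : Char) (l : List Char) :
    PySem.Chars.replace l [o] [n] = l.map (fun c => if c = o then n else c) := by
  simp [PySem.Chars.replace]
  rw [replace_go_single o n l l.length [] le_rfl]
  simp

-- the char list A finally splits is the translated input
set_option maxHeartbeats 1000000 in
lemma processed_eq_map (text : String) :
    (PySem.Str.replace (PySem.Str.replace (PySem.Str.replace (PySem.Str.replace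
      (PySem.Str.replace (PySem.Str.replace (PySem.Str.lower text) "," " ") "." " ")
      "!" " ") "?" " ") ":" " ") ";" " ").toList = text.toList.map pvTrans := by
  rw [PySem.Str.toList_replace, PySem.Str.toList_replace, PySem.Str.toList_replace,
    PySem.Str.toList_replace, PySem.Str.toList_replace, PySem.Str.toList_replace,
    PySem.Str.toList_lower]
  rw [show ("," : String).toList = [','] from rfl, show (("." : String)).toList = ['.'] from rfl,
    show (("!" : String)).toList = ['!'] from rfl, show (("?" : String)).toList = ['?'] from rfl,
    show ((":" : String)).toList = [':'] from rfl, show ((";" : String)).toList = [';'] from rfl,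
    show ((" " : String)).toList = [' '] from rfl]
  rw [replace_single, replace_single, replace_single, replace_single, replace_single,
    replace_single, PySem.Chars.lower]
  simp only [List.map_map]
  apply List.map_congr_left
  intro a _
  simp only [Function.comp_apply, pvTrans]
  by_cases h1 : PySem.Chars.lowerChar a = ','
  · simp [h1]
  by_cases h2 : PySem.Chars.lowerChar a = '.'
  · simp [h1, h2]
  by_cases h3 : PySem.Chars.lowerChar a = '!'
  · simp [h1, h2, h3]
  by_cases h4 : PySem.Chars.lowerChar a = '?'
  · simp [h1, h2, h3, h4]
  by_cases h5 : PySem.Chars.lowerChar a = ':'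
  · simp [h1, h2, h3, h4, h5]
  by_cases h6 : PySem.Chars.lowerChar a = ';'
  · simp [h1, h2, h3, h4, h5, h6]
  simp [h1, h2, h3, h4, h5, h6]

-- split₀.go's accumulator prepends its reversed contents to the result
lemma split₀_go_acc :
    ∀ (rest cur : List Char) (a : List (List Char)),
      PySem.Chars.split₀.go rest cur a = a.reverse ++ PySem.Chars.split₀.go rest cur [] := by
  intro rest
  induction rest with
  | nil =>
    intro cur a
    rw [PySem.Chars.split₀.go, PySem.Chars.split₀.go]
    by_cases h : cur.isEmpty <;> simp [h]
  | cons c t ih =>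
    intro cur a
    rw [PySem.Chars.split₀.go]
    conv_rhs => rw [PySem.Chars.split₀.go]
    by_cases hs : PySem.Chars.isspace c
    · by_cases h : cur.isEmpty
      · simp only [hs, h, if_true]
        exact ih [] a
      · simp only [hs, h, if_true, Bool.false_eq_true, if_false]
        rw [ih [] (cur.reverse :: a), ih [] [cur.reverse]]
        simp
    · simp only [hs, Bool.false_eq_true, if_false]
      exact ih (c :: cur) a

-- the empty word is not in the vocabulary
lemma hit_nil : pvHit [] = false := by decide

-- translating a char to a word boundary = the test Source B's loop performs
lemma isspace_trans (ch : Char) :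
    PySem.Chars.isspace (pvTrans ch)
      = ([',', '.', '!', '?', ':', ';'].contains (PySem.Chars.lowerChar ch)
          || PySem.Chars.isspace (PySem.Chars.lowerChar ch)) := by
  by_cases hp : [',', '.', '!', '?', ':', ';'].contains (PySem.Chars.lowerChar ch)
  · simp only [pvTrans, hp, if_true, Bool.true_or]
    decide
  · have hf := Bool.eq_false_iff.mpr hp
    simp only [pvTrans, hf, Bool.false_eq_true, if_false, Bool.false_or]

-- the scan of Source B equals score + number of common tokens split₀ would still produce
lemma scan_eq_count :
    ∀ (l cur : List Char) (score : Int),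
      wmsAltGo l cur score
        = score + (List.countP pvHit (PySem.Chars.split₀.go (l.map pvTrans) cur.reverse []) : Int) := by
  intro l
  induction l with
  | nil =>
    intro cur score
    simp only [wmsAltGo, List.map_nil]
    rw [PySem.Chars.split₀.go]
    rw [show COMMON_WORDS.contains (String.ofList cur) = pvHit cur from rfl]
    cases cur with
    | nil => simp [hit_nil]
    | cons x xs =>
      have h : (x :: xs).reverse.isEmpty = false := by simp
      simp only [h, Bool.false_eq_true, if_false, List.reverse_cons, List.reverse_reverse,
        List.reverse_nil, List.nil_append]
      by_cases hh : pvHit (x :: xs) <;> simp [hh, List.countP_cons]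
  | cons ch t ih =>
    intro cur score
    simp only [wmsAltGo, List.map_cons]
    rw [PySem.Chars.split₀.go]
    rw [show COMMON_WORDS.contains (String.ofList cur) = pvHit cur from rfl]
    rw [isspace_trans ch]
    by_cases hB : ([',', '.', '!', '?', ':', ';'].contains (PySem.Chars.lowerChar ch)
          || PySem.Chars.isspace (PySem.Chars.lowerChar ch)) = true
    · -- word boundary: the current word is emitted (scored) and reset
      simp only [hB, if_true]
      cases cur with
      | nil =>
        simp only [List.reverse_nil, List.isEmpty_nil, if_true]
        rw [ih [] _, hit_nil]
        simp
      | cons x xs =>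
        have h : (x :: xs).reverse.isEmpty = false := by simp
        simp only [h, Bool.false_eq_true, if_false, List.reverse_reverse]
        rw [split₀_go_acc (t.map pvTrans) [] [(x :: xs)], ih [] _]
        simp only [List.reverse_cons, List.reverse_nil, List.nil_append, List.countP_cons,
          List.countP_nil, List.countP_append]
        by_cases hh : pvHit (x :: xs) <;> simp [hh] <;> push_cast <;> ring
    · -- ordinary character: appended to the current word
      have hf := Bool.eq_false_iff.mpr hB
      rcases Bool.or_eq_false_iff.mp hf with ⟨hp, hs⟩
      have htr : pvTrans ch = PySem.Chars.lowerChar ch := by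
        simp only [pvTrans, hp, Bool.false_eq_true, if_false]
      simp only [hf, Bool.false_eq_true, if_false, htr]
      rw [ih (cur ++ [PySem.Chars.lowerChar ch]) score]
      simp only [List.reverse_append, List.reverse_cons, List.reverse_nil, List.nil_append,
        List.singleton_append]

-- ===== VERDICT (by name: the statement is the Claim_ definition above) =====
set_option maxHeartbeats 1000000 in
theorem word_match_score_spec : Claim_equal_word_match_score := by
  intro text _
  unfold Spec_word_match_score word_match_score word_match_score_alt
  have hsplit := PySem.Str.split₀_map_toList
    (PySem.Str.replace (PySem.Str.replace (PySem.Str.replace (PySem.Str.replace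
      (PySem.Str.replace (PySem.Str.replace (PySem.Str.lower text) "," " ") "." " ")
      "!" " ") "?" " ") ":" " ") ";" " ")
  rw [processed_eq_map] at hsplit
  set S := (PySem.Str.replace (PySem.Str.replace (PySem.Str.replace (PySem.Str.replace
      (PySem.Str.replace (PySem.Str.replace (PySem.Str.lower text) "," " ") "." " ")
      "!" " ") "?" " ") ":" " ") ";" " ") with hS
  show (PySem.Str.split₀ S).foldl (fun score word => if COMMON_WORDS.contains word then score + 1 else score) 0
      = wmsAltGo text.toList [] 0
  rw [PySem.List.foldl_if_add_one (fun w => COMMON_WORDS.contains w)]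
  rw [scan_eq_count]
  rw [show (([] : List Char)).reverse = ([] : List Char) from rfl]
  rw [show PySem.Chars.split₀.go (text.toList.map pvTrans) [] [] = PySem.Chars.split₀ (text.toList.map pvTrans) from rfl]
  rw [← hsplit, List.countP_map]
  have hpt : (pvHit ∘ String.toList) = fun w => COMMON_WORDS.contains w := by
    funext w
    simp [pvHit]
  rw [hpt]
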